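-- pv_equiv track=rewrite | github.com/guo-xuan/SiprosBenchmark | test/forward_ratio.py | get_protein_type
-- ===== SOURCE A (Python) =====
-- train_str = 'Rev_1_'
--
-- test_str = 'TestRev_'
--
-- reserve_str = 'Rev_2_'
--
-- LabelFwd = 1
--
-- LabelTrain = 2
--
-- LabelTest = 3
--
-- LabelReserve = 4
--
-- def get_protein_type(protein_sequence, lProtein=None):
--     """
--     get the protein type
--     if all reserved type, return LabelReserve
--     if all testing type, return LabelTest
--     if all training type, return LabelTrain
--     otherwise, it is forward protein, return LabelFwd
--     """
--     sProteins = protein_sequence.replace('{', '')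
--     sProteins = sProteins.replace('}', '')
--     asProteins = sProteins.split(',')
--     if lProtein != None:
--         del lProtein[:]
--         for sProtein in asProteins:
--             sProtein = sProtein.strip()
--             if sProtein not in lProtein:
--                 lProtein.append(sProtein)
--
--     protein_list_tmp_1 = []
--     protein_list_tmp_2 = []
--
--     reserve_type = True
--     if reserve_str != '':
--         for sProtein in asProteins:
--             if not sProtein.startswith(reserve_str):
--                 protein_list_tmp_1.append(sProtein)
--                 reserve_type = False
--         if reserve_type:
--             return LabelReserve
--
--     training_type = True
--     if train_str != '':
--         for sProtein in protein_list_tmp_1: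
--             if not sProtein.startswith(train_str):
--                 protein_list_tmp_2.append(sProtein)
--                 training_type = False
--         if training_type:
--             return LabelTrain
--
--     testing_type = True
--     if test_str != '':
--         for sProtein in protein_list_tmp_2:
--             if not sProtein.startswith(test_str):
--                 testing_type = False
--         if testing_type:
--             return LabelTest
--
--     return LabelFwd
-- ===== SOURCE B (Python) =====
-- train_str = 'Rev_1_'
--
-- test_str = 'TestRev_'
--
-- reserve_str = 'Rev_2_'
--
-- LabelFwd = 1
--
-- LabelTrain = 2
--
-- LabelTest = 3
--
-- LabelReserve = 4
--
-- def get_protein_type(protein_sequence, lProtein=None):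
--     """Single counting pass + closed-form comparisons instead of three
--     sequential filter passes building intermediate lists."""
--     sProteins = protein_sequence.replace('{', '').replace('}', '')
--     asProteins = sProteins.split(',')
--     if lProtein != None:
--         del lProtein[:]
--         for sProtein in asProteins:
--             sProtein = sProtein.strip()
--             if sProtein not in lProtein:
--                 lProtein.append(sProtein)
--     n = 0
--     nR = 0
--     nT = 0
--     nS = 0
--     for sProtein in asProteins:
--         n += 1
--         if sProtein.startswith(reserve_str):
--             nR += 1
--         elif sProtein.startswith(train_str):
--             nT += 1
--         elif sProtein.startswith(test_str):
--             nS += 1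
--     if nR == n:
--         return LabelReserve
--     if nR + nT == n:
--         return LabelTrain
--     if nR + nT + nS == n:
--         return LabelTest
--     return LabelFwd
-- ===== Notes on version B (the rewrite author's own statement) =====
-- stated objective: alternative
-- what changed: Replaced A's three sequential filter passes (each building an intermediate list of non-matching proteins) with a single counting pass over the split list plus closed-form comparisons nR==n, nR+nT==n, nR+nT+nS==n.
import Mathlib
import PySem

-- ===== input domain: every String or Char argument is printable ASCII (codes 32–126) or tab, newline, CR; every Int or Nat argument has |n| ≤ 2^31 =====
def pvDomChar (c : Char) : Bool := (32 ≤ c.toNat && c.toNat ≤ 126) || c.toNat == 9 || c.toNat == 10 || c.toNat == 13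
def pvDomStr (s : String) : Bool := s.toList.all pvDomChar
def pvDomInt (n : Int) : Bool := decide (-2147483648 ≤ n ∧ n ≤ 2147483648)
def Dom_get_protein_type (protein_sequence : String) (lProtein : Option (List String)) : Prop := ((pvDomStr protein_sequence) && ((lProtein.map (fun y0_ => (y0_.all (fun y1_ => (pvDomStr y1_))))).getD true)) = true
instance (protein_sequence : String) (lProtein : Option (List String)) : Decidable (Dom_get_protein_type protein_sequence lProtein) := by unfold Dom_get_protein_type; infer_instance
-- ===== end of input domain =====

-- B replaces A's three sequential filter passes (each building an intermediate list) by ONE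
-- counting pass plus closed-form comparisons (nR = n / nR+nT = n / nR+nT+nS = n); objective:
-- alternative decomposition, same asymptotic cost. Both Pythons mutate lProtein (clear +
-- dedup-append) identically; that side effect does not influence the return value and the
-- equivalence proved here is about the return value only.

-- ===== PORT A =====
-- A's guards `if reserve_str != ''` etc. compare nonempty string constants and are always
-- true; they are folded away here. The lProtein dedup loop only mutates the argument and
-- never affects the return value, so it is not modelled (return value only, see header).
def get_protein_type (protein_sequence : String) (lProtein : Option (List String)) : Int :=
  let sProteins := PySem.Str.replace protein_sequence "{" ""
  let sProteins := PySem.Str.replace sProteins "}" ""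
  -- ',' ≠ "", so Python's split never raises: split? is `some` here
  let asProteins := (PySem.Str.split? sProteins ",").getD []
  -- first pass: (protein_list_tmp_1, reserve_type)
  let st1 := asProteins.foldl
    (fun (p : List String × Bool) sProtein =>
      if !(PySem.Str.startswith sProtein "Rev_2_") then (p.1 ++ [sProtein], false) else p)
    ([], true)
  if st1.2 then 4 else
  -- second pass: (protein_list_tmp_2, training_type)
  let st2 := st1.1.foldl
    (fun (p : List String × Bool) sProtein =>
      if !(PySem.Str.startswith sProtein "Rev_1_") then (p.1 ++ [sProtein], false) else p)
    ([], true)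
  if st2.2 then 2 else
  -- third pass: testing_type
  let testing := st2.1.foldl
    (fun b sProtein => if !(PySem.Str.startswith sProtein "TestRev_") then false else b) true
  if testing then 3 else 1

-- ===== PORT B =====
def get_protein_type_alt (protein_sequence : String) (lProtein : Option (List String)) : Int :=
  let sProteins := PySem.Str.replace (PySem.Str.replace protein_sequence "{" "") "}" ""
  let asProteins := (PySem.Str.split? sProteins ",").getD []
  -- single counting pass: (n, nR, nT, nS)
  let c := asProteins.foldl
    (fun (c : Nat × Nat × Nat × Nat) sProtein =>
      let n := c.1 + 1
      if PySem.Str.startswith sProtein "Rev_2_" then (n, c.2.1 + 1, c.2.2.1, c.2.2.2)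
      else if PySem.Str.startswith sProtein "Rev_1_" then (n, c.2.1, c.2.2.1 + 1, c.2.2.2)
      else if PySem.Str.startswith sProtein "TestRev_" then (n, c.2.1, c.2.2.1, c.2.2.2 + 1)
      else (n, c.2.1, c.2.2.1, c.2.2.2))
    (0, 0, 0, 0)
  if c.2.1 = c.1 then 4
  else if c.2.1 + c.2.2.1 = c.1 then 2
  else if c.2.1 + c.2.2.1 + c.2.2.2 = c.1 then 3
  else 1

-- ===== PRECONDITION & SPEC =====
def Spec_get_protein_type (protein_sequence : String) (lProtein : Option (List String)) (out : Int) : Prop := out = get_protein_type_alt protein_sequence lProtein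
instance (protein_sequence : String) (lProtein : Option (List String)) (out : Int) : Decidable (Spec_get_protein_type protein_sequence lProtein out) := by unfold Spec_get_protein_type; infer_instance

-- ===== CLAIM (what is proved, stated in full; the proofs are below) =====
def Claim_equal_get_protein_type : Prop := ∀ (protein_sequence : String) (lProtein : Option (List String)), Dom_get_protein_type protein_sequence lProtein → Spec_get_protein_type protein_sequence lProtein (get_protein_type protein_sequence lProtein)

-- ===== LEMMAS AND PROOFS =====

-- A's filter-pass loop: accumulates the non-matching entries and ands the flag
theorem pv_filtFold (p : String → Bool) (l : List String) (acc : List String) (b : Bool) :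
    l.foldl (fun (q : List String × Bool) s =>
        if !(p s) then (q.1 ++ [s], false) else q) (acc, b)
      = (acc ++ l.filter (fun s => !(p s)), b && l.all p) := by
  induction l generalizing acc b with
  | nil => simp
  | cons x xs ih =>
    rw [List.foldl_cons]
    cases hp : p x with
    | false =>
      rw [if_pos (by simp), ih]
      simp [hp]
    | true =>
      rw [if_neg (by simp), ih]
      simp [hp]

-- A's third loop: the flag survives iff every entry matches
theorem pv_testFold (p : String → Bool) (l : List String) (b : Bool) :
    l.foldl (fun b s => if !(p s) then false else b) b = (b && l.all p) := by
  induction l generalizing b with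
  | nil => simp
  | cons x xs ih =>
    rw [List.foldl_cons]
    cases hp : p x with
    | false =>
      rw [if_pos (by simp), ih]
      simp [hp]
    | true =>
      rw [if_neg (by simp), ih]
      simp [hp]

-- B's counting loop, in closed form
theorem pv_countFold (l : List String) (c : Nat × Nat × Nat × Nat) :
    l.foldl (fun (c : Nat × Nat × Nat × Nat) sProtein =>
        let n := c.1 + 1
        if PySem.Str.startswith sProtein "Rev_2_" then (n, c.2.1 + 1, c.2.2.1, c.2.2.2)
        else if PySem.Str.startswith sProtein "Rev_1_" then (n, c.2.1, c.2.2.1 + 1, c.2.2.2)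
        else if PySem.Str.startswith sProtein "TestRev_" then (n, c.2.1, c.2.2.1, c.2.2.2 + 1)
        else (n, c.2.1, c.2.2.1, c.2.2.2)) c
      = (c.1 + l.length,
         c.2.1 + l.countP (fun s => PySem.Str.startswith s "Rev_2_"),
         c.2.2.1 + l.countP (fun s => PySem.Str.startswith s "Rev_1_" && !PySem.Str.startswith s "Rev_2_"),
         c.2.2.2 + l.countP (fun s =>
           (PySem.Str.startswith s "TestRev_" && !PySem.Str.startswith s "Rev_1_") && !PySem.Str.startswith s "Rev_2_")) := by
  induction l generalizing c with
  | nil => simp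
  | cons x xs ih =>
    rw [List.foldl_cons, ih]
    cases hR : PySem.Str.startswith x "Rev_2_" <;>
      cases hT : PySem.Str.startswith x "Rev_1_" <;>
        cases hS : PySem.Str.startswith x "TestRev_" <;>
          simp only [List.countP_cons, List.length_cons, hR, hT, hS] <;>
            simp [Prod.ext_iff] <;> omega

-- partition of a count by a predicate
theorem pv_countP_not (p : String → Bool) (l : List String) :
    l.countP p + l.countP (fun s => !(p s)) = l.length := by
  induction l with
  | nil => simp
  | cons x xs ih =>
    cases hp : p x <;> simp [hp] <;> omega

-- the core equality, over the already-split list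
theorem pv_core (l : List String) :
    (let st1 := l.foldl
        (fun (p : List String × Bool) sProtein =>
          if !(PySem.Str.startswith sProtein "Rev_2_") then (p.1 ++ [sProtein], false) else p)
        ([], true)
      if st1.2 then (4 : Int) else
      let st2 := st1.1.foldl
        (fun (p : List String × Bool) sProtein =>
          if !(PySem.Str.startswith sProtein "Rev_1_") then (p.1 ++ [sProtein], false) else p)
        ([], true)
      if st2.2 then 2 else
      let testing := st2.1.foldl
        (fun b sProtein => if !(PySem.Str.startswith sProtein "TestRev_") then false else b) true
      if testing then 3 else 1)
    = (let c := l.foldl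
        (fun (c : Nat × Nat × Nat × Nat) sProtein =>
          let n := c.1 + 1
          if PySem.Str.startswith sProtein "Rev_2_" then (n, c.2.1 + 1, c.2.2.1, c.2.2.2)
          else if PySem.Str.startswith sProtein "Rev_1_" then (n, c.2.1, c.2.2.1 + 1, c.2.2.2)
          else if PySem.Str.startswith sProtein "TestRev_" then (n, c.2.1, c.2.2.1, c.2.2.2 + 1)
          else (n, c.2.1, c.2.2.1, c.2.2.2))
        (0, 0, 0, 0)
      if c.2.1 = c.1 then (4 : Int)
      else if c.2.1 + c.2.2.1 = c.1 then 2
      else if c.2.1 + c.2.2.1 + c.2.2.2 = c.1 then 3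
      else 1) := by
  simp only [pv_filtFold, pv_countFold, pv_testFold, List.nil_append, Bool.true_and, Nat.zero_add]
  have hpart1 : l.countP (fun s => PySem.Str.startswith s "Rev_2_")
      + l.countP (fun s => !(PySem.Str.startswith s "Rev_2_")) = l.length :=
    pv_countP_not _ l
  have hf1len : (l.filter (fun s => !(PySem.Str.startswith s "Rev_2_"))).length
      = l.countP (fun s => !(PySem.Str.startswith s "Rev_2_")) :=
    List.countP_eq_length_filter.symm
  have hpart2 : (l.filter (fun s => !(PySem.Str.startswith s "Rev_2_"))).countP
        (fun s => PySem.Str.startswith s "Rev_1_")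
      + (l.filter (fun s => !(PySem.Str.startswith s "Rev_2_"))).countP
        (fun s => !(PySem.Str.startswith s "Rev_1_"))
      = (l.filter (fun s => !(PySem.Str.startswith s "Rev_2_"))).length :=
    pv_countP_not _ _
  have hf2len : ((l.filter (fun s => !(PySem.Str.startswith s "Rev_2_"))).filter
        (fun s => !(PySem.Str.startswith s "Rev_1_"))).length
      = (l.filter (fun s => !(PySem.Str.startswith s "Rev_2_"))).countP
        (fun s => !(PySem.Str.startswith s "Rev_1_")) :=
    List.countP_eq_length_filter.symm
  have hc2 : l.countP (fun s => PySem.Str.startswith s "Rev_1_" && !PySem.Str.startswith s "Rev_2_")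
      = (l.filter (fun s => !(PySem.Str.startswith s "Rev_2_"))).countP
        (fun s => PySem.Str.startswith s "Rev_1_") :=
    List.countP_filter.symm
  have hc3 : l.countP (fun s =>
        (PySem.Str.startswith s "TestRev_" && !PySem.Str.startswith s "Rev_1_") && !PySem.Str.startswith s "Rev_2_")
      = ((l.filter (fun s => !(PySem.Str.startswith s "Rev_2_"))).filter
          (fun s => !(PySem.Str.startswith s "Rev_1_"))).countP
        (fun s => PySem.Str.startswith s "TestRev_") := by
    rw [List.countP_filter, List.countP_filter]
  have key1 : (l.countP (fun s => PySem.Str.startswith s "Rev_2_") = l.length)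
      ↔ (l.all (fun s => PySem.Str.startswith s "Rev_2_") = true) := by
    rw [List.countP_eq_length, List.all_eq_true]
  have key2 : ((l.filter (fun s => !(PySem.Str.startswith s "Rev_2_"))).countP
        (fun s => PySem.Str.startswith s "Rev_1_")
        = (l.filter (fun s => !(PySem.Str.startswith s "Rev_2_"))).length)
      ↔ ((l.filter (fun s => !(PySem.Str.startswith s "Rev_2_"))).all
        (fun s => PySem.Str.startswith s "Rev_1_") = true) := by
    rw [List.countP_eq_length, List.all_eq_true]
  have key3 : (((l.filter (fun s => !(PySem.Str.startswith s "Rev_2_"))).filter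
          (fun s => !(PySem.Str.startswith s "Rev_1_"))).countP
        (fun s => PySem.Str.startswith s "TestRev_")
        = ((l.filter (fun s => !(PySem.Str.startswith s "Rev_2_"))).filter
          (fun s => !(PySem.Str.startswith s "Rev_1_"))).length)
      ↔ (((l.filter (fun s => !(PySem.Str.startswith s "Rev_2_"))).filter
          (fun s => !(PySem.Str.startswith s "Rev_1_"))).all
        (fun s => PySem.Str.startswith s "TestRev_") = true) := by
    rw [List.countP_eq_length, List.all_eq_true]
  have E1 : (l.countP (fun s => PySem.Str.startswith s "Rev_2_") = l.length)
      ↔ (l.all (fun s => PySem.Str.startswith s "Rev_2_") = true) := key1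
  have E2 : (l.countP (fun s => PySem.Str.startswith s "Rev_2_")
        + l.countP (fun s => PySem.Str.startswith s "Rev_1_" && !PySem.Str.startswith s "Rev_2_")
        = l.length)
      ↔ ((l.filter (fun s => !(PySem.Str.startswith s "Rev_2_"))).all
        (fun s => PySem.Str.startswith s "Rev_1_") = true) := by
    rw [hc2, ← key2]
    omega
  have E3 : (l.countP (fun s => PySem.Str.startswith s "Rev_2_")
        + l.countP (fun s => PySem.Str.startswith s "Rev_1_" && !PySem.Str.startswith s "Rev_2_")
        + l.countP (fun s =>
            (PySem.Str.startswith s "TestRev_" && !PySem.Str.startswith s "Rev_1_") && !PySem.Str.startswith s "Rev_2_")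
        = l.length)
      ↔ (((l.filter (fun s => !(PySem.Str.startswith s "Rev_2_"))).filter
          (fun s => !(PySem.Str.startswith s "Rev_1_"))).all
        (fun s => PySem.Str.startswith s "TestRev_") = true) := by
    rw [hc2, hc3, ← key3]
    omega
  by_cases h1 : l.all (fun s => PySem.Str.startswith s "Rev_2_") = true
  · rw [if_pos h1, if_pos (E1.mpr h1)]
  · rw [if_neg h1, if_neg (fun h => h1 (E1.mp h))]
    by_cases h2 : (l.filter (fun s => !(PySem.Str.startswith s "Rev_2_"))).all
        (fun s => PySem.Str.startswith s "Rev_1_") = true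
    · rw [if_pos h2, if_pos (E2.mpr h2)]
    · rw [if_neg h2, if_neg (fun h => h2 (E2.mp h))]
      by_cases h3 : ((l.filter (fun s => !(PySem.Str.startswith s "Rev_2_"))).filter
          (fun s => !(PySem.Str.startswith s "Rev_1_"))).all
        (fun s => PySem.Str.startswith s "TestRev_") = true
      · rw [if_pos h3, if_pos (E3.mpr h3)]
      · rw [if_neg h3, if_neg (fun h => h3 (E3.mp h))]

-- ===== VERDICT (by name: the statement is the Claim_ definition above) =====
theorem get_protein_type_spec : Claim_equal_get_protein_type := by
  intro protein_sequence lProtein _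
  unfold Spec_get_protein_type get_protein_type get_protein_type_alt
  exact pv_core _
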